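-- pv_equiv track=rewrite | github.com/EdgarLira25/trabalhos-graduacao | EP-Seg-informacao/Texto_desconhecido/Cifrado/Vigenere/main.py | texto_para_num
-- ===== SOURCE A (Python) =====
-- def texto_para_num(palavra1, palavra2):
--     lista = [[]  for _ in range(100)]
--     alfabeto = "abcdefghijklmnopqrstuvwxyz"
--     bans = "wxyk"
--     listando = []
--     for indice in range(len(palavra1)):
--         diff_num = (alfabeto.index(palavra1[indice]) - alfabeto.index(palavra2[indice]))%26
--         listando.append(diff_num)
--         for x in range(len(alfabeto)):
--             parte1 = alfabeto[x]
--             parte2 = alfabeto[(x+diff_num)%26]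
--             if parte1 not in bans and parte2 not in bans:
--                 lista[indice].append([parte1, parte2])
--
--     return lista
-- ===== SOURCE B (Python) =====
-- def texto_para_num(palavra1, palavra2):
--     alfabeto = "abcdefghijklmnopqrstuvwxyz"
--     bans = "wxyk"
--     # one table entry per possible shift difference d in 0..25
--     table = [
--         [[alfabeto[x], alfabeto[(x + d) % 26]]
--          for x in range(26)
--          if alfabeto[x] not in bans and alfabeto[(x + d) % 26] not in bans]
--         for d in range(26)
--     ]
--     n = len(palavra1)
--     diffs = [(alfabeto.index(palavra1[i]) - alfabeto.index(palavra2[i])) % 26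
--              for i in range(n)]
--     return [[pair[:] for pair in table[diffs[i]]] if i < n else []
--             for i in range(100)]
-- ===== Notes on version B (the rewrite author's own statement) =====
-- stated objective: alternative
-- what changed: A fills each slot of the 100-slot list by re-running a 26-iteration scan-and-append inner loop per position; B precomputes the 26 possible diff rows once as a table and builds the result in a single lookup pass over the 100 positions, dropping A's unused 'listando' accumulator.
import Mathlib
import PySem

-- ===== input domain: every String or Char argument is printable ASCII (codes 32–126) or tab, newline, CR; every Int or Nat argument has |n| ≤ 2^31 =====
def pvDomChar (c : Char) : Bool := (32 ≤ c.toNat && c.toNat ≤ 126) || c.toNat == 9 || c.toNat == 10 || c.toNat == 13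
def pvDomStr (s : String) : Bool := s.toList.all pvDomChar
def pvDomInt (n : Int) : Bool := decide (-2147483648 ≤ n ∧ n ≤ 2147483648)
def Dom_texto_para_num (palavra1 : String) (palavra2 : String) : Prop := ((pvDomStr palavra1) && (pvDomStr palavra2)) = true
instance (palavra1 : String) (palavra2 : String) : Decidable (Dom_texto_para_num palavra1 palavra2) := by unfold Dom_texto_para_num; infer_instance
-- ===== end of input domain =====

-- B replaces A's per-position inner 26-scan-and-append with a precomputed table of the 26
-- possible diff rows plus a lookup pass over the fixed 100 positions (objective: alternative).

-- ===== PORT A =====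
def texto_para_num (palavra1 : String) (palavra2 : String) : List (List (List String)) :=
  let lista : List (List (List String)) := (PySem.List.pyRange 0 100 1).map (fun _ => [])
  let alfabeto : List Char := "abcdefghijklmnopqrstuvwxyz".toList
  let bans : List Char := "wxyk".toList
  let l1 := palavra1.toList
  let l2 := palavra2.toList
  -- A's 'listando' accumulator is built but never used; it cannot affect the return value
  (PySem.List.pyRange 0 (l1.length : Int) 1).foldl (fun lista indice =>
    let diff_num : Int := PySem.Int.mod
      ((((PySem.List.index? alfabeto ((PySem.List.pyGet? l1 indice).getD 'a')).getD 0 : Nat) : Int)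
        - (((PySem.List.index? alfabeto ((PySem.List.pyGet? l2 indice).getD 'a')).getD 0 : Nat) : Int)) 26
    (PySem.List.pyRange 0 26 1).foldl (fun lista x =>
      let parte1 := (PySem.List.pyGet? alfabeto x).getD 'a'
      let parte2 := (PySem.List.pyGet? alfabeto (PySem.Int.mod (x + diff_num) 26)).getD 'a'
      if parte1 ∉ bans ∧ parte2 ∉ bans then
        lista.modify indice.toNat (fun row => row ++ [[String.ofList [parte1], String.ofList [parte2]]])
      else lista) lista) lista

-- ===== PORT B =====
def texto_para_num_alt (palavra1 : String) (palavra2 : String) : List (List (List String)) :=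
  let alfabeto : List Char := "abcdefghijklmnopqrstuvwxyz".toList
  let bans : List Char := "wxyk".toList
  let table : List (List (List String)) := (PySem.List.pyRange 0 26 1).map (fun d =>
    ((PySem.List.pyRange 0 26 1).filter (fun x =>
        decide ((PySem.List.pyGet? alfabeto x).getD 'a' ∉ bans ∧
                (PySem.List.pyGet? alfabeto (PySem.Int.mod (x + d) 26)).getD 'a' ∉ bans))).map (fun x =>
      [String.ofList [(PySem.List.pyGet? alfabeto x).getD 'a'],
       String.ofList [(PySem.List.pyGet? alfabeto (PySem.Int.mod (x + d) 26)).getD 'a']]))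
  let l1 := palavra1.toList
  let l2 := palavra2.toList
  let n : Int := (l1.length : Int)
  let diffs : List Int := (PySem.List.pyRange 0 n 1).map (fun i =>
    PySem.Int.mod ((((PySem.List.index? alfabeto ((PySem.List.pyGet? l1 i).getD 'a')).getD 0 : Nat) : Int)
      - (((PySem.List.index? alfabeto ((PySem.List.pyGet? l2 i).getD 'a')).getD 0 : Nat) : Int)) 26)
  (PySem.List.pyRange 0 100 1).map (fun i =>
    if i < n then
      ((PySem.List.pyGet? table ((PySem.List.pyGet? diffs i).getD 0)).getD []).map
        (fun pair => PySem.List.slice pair none none)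
    else [])

-- ===== PRECONDITION & SPEC =====
-- Pre_ excludes exactly the inputs where A raises: palavra1 longer than the fixed 100-slot list
-- (IndexError), a scanned character outside a-z (ValueError), or palavra2 shorter than palavra1 (IndexError).
def Pre_texto_para_num (palavra1 : String) (palavra2 : String) : Prop :=
  palavra1.toList.length ≤ 100 ∧ palavra1.toList.length ≤ palavra2.toList.length ∧
  (palavra1.toList.all (fun c => 'a' ≤ c && c ≤ 'z')) = true ∧
  ((palavra2.toList.take palavra1.toList.length).all (fun c => 'a' ≤ c && c ≤ 'z')) = true
instance (palavra1 : String) (palavra2 : String) : Decidable (Pre_texto_para_num palavra1 palavra2) := by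
  unfold Pre_texto_para_num; infer_instance
def pvWitness_texto_para_num : String × String := ("ab", "ba")
def Spec_texto_para_num (palavra1 : String) (palavra2 : String) (out : List (List (List String))) : Prop := out = texto_para_num_alt palavra1 palavra2
instance (palavra1 : String) (palavra2 : String) (out : List (List (List String))) : Decidable (Spec_texto_para_num palavra1 palavra2 out) := by unfold Spec_texto_para_num; infer_instance

-- ===== CLAIM (what is proved, stated in full; the proofs are below) =====
def Claim_equal_texto_para_num : Prop := ∀ (palavra1 : String) (palavra2 : String), Dom_texto_para_num palavra1 palavra2 → Pre_texto_para_num palavra1 palavra2 → Spec_texto_para_num palavra1 palavra2 (texto_para_num palavra1 palavra2)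

-- ===== LEMMAS AND PROOFS =====

def pvAlf : List Char := "abcdefghijklmnopqrstuvwxyz".toList
def pvBans : List Char := "wxyk".toList

-- the per-position diff as both programs compute it
def pvDiffAt (l1 l2 : List Char) (i : Int) : Int :=
  PySem.Int.mod ((((PySem.List.index? pvAlf ((PySem.List.pyGet? l1 i).getD 'a')).getD 0 : Nat) : Int)
    - (((PySem.List.index? pvAlf ((PySem.List.pyGet? l2 i).getD 'a')).getD 0 : Nat) : Int)) 26

-- the pair row a given diff generates (B's table entry; A's inner loop appends exactly this)
def pvRow (d : Int) : List (List String) :=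
  ((PySem.List.pyRange 0 26 1).filter (fun x =>
      decide ((PySem.List.pyGet? pvAlf x).getD 'a' ∉ pvBans ∧
              (PySem.List.pyGet? pvAlf (PySem.Int.mod (x + d) 26)).getD 'a' ∉ pvBans))).map (fun x =>
    [String.ofList [(PySem.List.pyGet? pvAlf x).getD 'a'],
     String.ofList [(PySem.List.pyGet? pvAlf (PySem.Int.mod (x + d) 26)).getD 'a']])

-- A's outer-loop body, named so the fold can be reasoned about (definitionally A's lambda)
def pvStep (l1 l2 : List Char) (lista : List (List (List String))) (indice : Int) : List (List (List String)) :=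
  let diff_num : Int := PySem.Int.mod
    ((((PySem.List.index? pvAlf ((PySem.List.pyGet? l1 indice).getD 'a')).getD 0 : Nat) : Int)
      - (((PySem.List.index? pvAlf ((PySem.List.pyGet? l2 indice).getD 'a')).getD 0 : Nat) : Int)) 26
  (PySem.List.pyRange 0 26 1).foldl (fun lista x =>
    let parte1 := (PySem.List.pyGet? pvAlf x).getD 'a'
    let parte2 := (PySem.List.pyGet? pvAlf (PySem.Int.mod (x + diff_num) 26)).getD 'a'
    if parte1 ∉ pvBans ∧ parte2 ∉ pvBans then
      lista.modify indice.toNat (fun row => row ++ [[String.ofList [parte1], String.ofList [parte2]]])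
    else lista) lista

def pvInit : List (List (List String)) := (PySem.List.pyRange 0 100 1).map (fun _ => [])
def pvTable : List (List (List String)) := (PySem.List.pyRange 0 26 1).map pvRow
def pvDiffs (l1 l2 : List Char) : List Int := (PySem.List.pyRange 0 (l1.length : Int) 1).map (pvDiffAt l1 l2)

lemma pv_modify_modify {α : Type} (l : List α) (i : Nat) (f g : α → α) :
    (l.modify i f).modify i g = l.modify i (fun a => g (f a)) := by
  apply List.ext_getElem <;> simp [List.getElem_modify]
  intro j h1 h2; split <;> simp_all

-- a loop that conditionally appends to the single slot i equals one modify of that slot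
lemma pv_modfold {α γ : Type} (xs : List α) (p : α → Prop) [DecidablePred p] (f : α → γ)
    (lista : List (List γ)) (i : Nat) :
    xs.foldl (fun st x => if p x then st.modify i (fun row => row ++ [f x]) else st) lista
      = lista.modify i (fun row => row ++ (xs.filter (fun x => decide (p x))).map f) := by
  induction xs generalizing lista with
  | nil =>
    simp only [List.foldl_nil, List.filter_nil, List.map_nil, List.append_nil]
    apply List.ext_getElem <;> simp [List.getElem_modify]
  | cons x xs ih =>
    simp only [List.foldl_cons, List.filter_cons]
    by_cases hp : p x
    · simp only [hp, if_pos, decide_true, ih, pv_modify_modify]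
      congr 1; funext row; simp
    · simp [hp, ih]

lemma pvStep_eq (l1 l2 : List Char) (lista : List (List (List String))) (indice : Int) :
    pvStep l1 l2 lista indice = lista.modify indice.toNat (fun row => row ++ pvRow (pvDiffAt l1 l2 indice)) := by
  unfold pvStep pvRow pvDiffAt
  exact pv_modfold _ _ _ _ _

lemma pvA_unfold (palavra1 palavra2 : String) :
    texto_para_num palavra1 palavra2
      = (PySem.List.pyRange 0 (palavra1.toList.length : Int) 1).foldl (pvStep palavra1.toList palavra2.toList) pvInit := rfl

lemma pvMap_update (m : Nat) (g : Int → List (List String)) :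
    ((PySem.List.pyRange 0 100 1).map (fun i => if i < (m:Int) then g i else [])).modify m (fun row => row ++ g m)
    = (PySem.List.pyRange 0 100 1).map (fun i => if i < (m:Int)+1 then g i else []) := by
  apply List.ext_getElem
  · simp
  · intro j hj hj2
    simp only [List.getElem_modify, List.getElem_map, PySem.List.getElem_pyRange_one, zero_add] at *
    by_cases hjm : m = j
    · subst hjm; simp
    · rw [if_neg hjm]
      split_ifs with h1 h2 h2 <;> first | rfl | omega

lemma pvA_aux (l1 l2 : List Char) (m : Nat) (hm : m ≤ 100) :
    (PySem.List.pyRange 0 (m : Int) 1).foldl (pvStep l1 l2) pvInit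
      = (PySem.List.pyRange 0 100 1).map (fun i => if i < (m : Int) then pvRow (pvDiffAt l1 l2 i) else []) := by
  induction m with
  | zero =>
    rw [Nat.cast_zero, PySem.List.pyRange_one_eq_nil le_rfl, List.foldl_nil]
    unfold pvInit
    apply List.map_congr_left
    intro i hi
    have h0 := (PySem.List.mem_pyRange_one.mp hi).1
    rw [if_neg (by omega)]
  | succ m ih =>
    have hm' : m ≤ 100 := by omega
    rw [Nat.cast_succ, PySem.List.pyRange_one_succ_right (by positivity), List.foldl_append,
      List.foldl_cons, List.foldl_nil, ih hm', pvStep_eq]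
    rw [show ((m:Int)).toNat = m from Int.toNat_natCast m]
    exact pvMap_update m (fun i => pvRow (pvDiffAt l1 l2 i))

lemma pvB_unfold (palavra1 palavra2 : String) :
    texto_para_num_alt palavra1 palavra2
      = (PySem.List.pyRange 0 100 1).map (fun i =>
          if i < (palavra1.toList.length : Int) then
            ((PySem.List.pyGet? pvTable ((PySem.List.pyGet? (pvDiffs palavra1.toList palavra2.toList) i).getD 0)).getD []).map
              (fun pair => PySem.List.slice pair none none)
          else []) := rfl

lemma pvDiffs_get (l1 l2 : List Char) (i : Int) (h0 : 0 ≤ i) (hi : i < (l1.length : Int)) :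
    (PySem.List.pyGet? (pvDiffs l1 l2) i).getD 0 = pvDiffAt l1 l2 i := by
  rw [PySem.List.pyGet?_of_nonneg _ h0]
  unfold pvDiffs
  rw [PySem.List.getElem?_map_pyRange_zero _ _ i.toNat (by omega)]
  simp [Int.toNat_of_nonneg h0]

lemma pvTable_get (d : Int) (h0 : 0 ≤ d) (h26 : d < 26) :
    (PySem.List.pyGet? pvTable d).getD [] = pvRow d := by
  rw [PySem.List.pyGet?_of_nonneg _ h0]
  unfold pvTable
  rw [show (26 : Int) = ((26 : Nat) : Int) from rfl, PySem.List.getElem?_map_pyRange_zero _ _ d.toNat (by omega)]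
  simp [Int.toNat_of_nonneg h0]

lemma pvB_eq (palavra1 palavra2 : String) :
    texto_para_num_alt palavra1 palavra2
      = (PySem.List.pyRange 0 100 1).map (fun i => if i < (palavra1.toList.length : Int) then pvRow (pvDiffAt palavra1.toList palavra2.toList i) else []) := by
  rw [pvB_unfold]
  apply List.map_congr_left
  intro i hi
  obtain ⟨h0, _⟩ := PySem.List.mem_pyRange_one.mp hi
  by_cases hin : i < (palavra1.toList.length : Int)
  · have hd0 : 0 ≤ pvDiffAt palavra1.toList palavra2.toList i := by
      unfold pvDiffAt; exact PySem.Int.mod_nonneg _ (by norm_num)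
    have hd26 : pvDiffAt palavra1.toList palavra2.toList i < 26 := by
      unfold pvDiffAt; exact PySem.Int.mod_lt _ (by norm_num)
    rw [if_pos hin, if_pos hin, pvDiffs_get _ _ _ h0 hin,
      pvTable_get (pvDiffAt palavra1.toList palavra2.toList i) hd0 hd26]
    simp [PySem.List.slice_none_none]
  · rw [if_neg hin, if_neg hin]

-- ===== VERDICT (by name: the statement is the Claim_ definition above) =====
theorem texto_para_num_spec : Claim_equal_texto_para_num := by
  intro palavra1 palavra2 _ hpre
  unfold Spec_texto_para_num
  rw [pvA_unfold, pvA_aux palavra1.toList palavra2.toList _ hpre.1, pvB_eq]
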